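-- pv_equiv track=rewrite | github.com/CGraciolli/Leetcode | dynamic/palindromic.py | howManyOddPalCen
-- ===== SOURCE A (Python) =====
-- def is_pal(s):
--     r = s[::-1]
--     return r == s
--
-- def is_within_range(s, j):
--     if j >= 0:
--         return j < len(s)
--     return False
--
-- def howManyOddPalCen(s, center_index):
--     contador = 0
--     i = 0
--     go_on = True
--     while i <= center_index and is_within_range(s, center_index + i) and go_on:
--         if is_pal(s[center_index - i : center_index + i + 1]):
--             contador += 1
--             i += 1
--         else:
--             go_on = False
--     return contador
-- ===== SOURCE B (Python) =====
-- def howManyOddPalCen(s, center_index):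
--     # Expand around the center, comparing only the two new outer characters
--     # at each step (O(k) instead of re-checking the whole substring).
--     if not (0 <= center_index < len(s)):
--         return 0
--     count = 0
--     i = 0
--     while i <= center_index and center_index + i < len(s) and s[center_index - i] == s[center_index + i]:
--         count += 1
--         i += 1
--     return count
-- ===== Notes on version B (the rewrite author's own statement) =====
-- stated objective: faster
-- what changed: B expands around the center comparing only the two new outer characters per step instead of rebuilding and re-checking the whole slice as a palindrome at every step.
import Mathlib
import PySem

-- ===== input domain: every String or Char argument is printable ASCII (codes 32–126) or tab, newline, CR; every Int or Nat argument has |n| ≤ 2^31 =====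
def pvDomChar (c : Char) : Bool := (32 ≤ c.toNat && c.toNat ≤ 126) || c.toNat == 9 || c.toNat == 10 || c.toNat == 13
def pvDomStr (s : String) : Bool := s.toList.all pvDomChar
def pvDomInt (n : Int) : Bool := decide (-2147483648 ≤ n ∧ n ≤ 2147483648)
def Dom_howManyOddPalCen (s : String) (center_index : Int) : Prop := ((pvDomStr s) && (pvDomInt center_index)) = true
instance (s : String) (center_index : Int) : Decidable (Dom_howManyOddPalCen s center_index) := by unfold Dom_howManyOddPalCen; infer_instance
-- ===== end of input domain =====

-- B replaces A's per-step re-check of the whole substring by comparing only the two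
-- new outer characters at each expansion step.
-- Both loops are transcribed with a structural counter fuel = (ci + 1 - i).toNat, the
-- number of loop tests left before 'i <= center_index' fails: fuel = 0 implies i > ci,
-- where both loops exit, so the transcription is exact.

-- ===== PORT A =====
-- is_pal(s): r = s[::-1]; return r == s   (s[::-1] is List.reverse, PySem.List.slice?_none_none_neg_one)
def pvIsPal (cs : List Char) : Bool :=
  let r := cs.reverse
  r == cs

-- is_within_range(s, j)
def pvIsWithinRange (cs : List Char) (j : Int) : Bool :=
  if j ≥ 0 then decide (j < (cs.length : Int)) else false

-- the while loop of A; 'go_on = False' makes the next loop test fail, so the else branch returns contador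
def pvALoop (cs : List Char) (ci : Int) (fuel : Nat) (i contador : Int) : Int :=
  match fuel with
  | 0 => contador
  | fuel + 1 =>
    if i ≤ ci ∧ pvIsWithinRange cs (ci + i) = true then
      if pvIsPal (PySem.List.slice cs (some (ci - i)) (some (ci + i + 1))) then
        pvALoop cs ci fuel (i + 1) (contador + 1)
      else contador
    else contador

def howManyOddPalCen (s : String) (center_index : Int) : Int :=
  pvALoop s.toList center_index (center_index + 1).toNat 0 0

-- ===== PORT B =====
-- the while loop of B: compare only the two outer characters s[ci-i] and s[ci+i]
def pvBLoop (cs : List Char) (ci : Int) (fuel : Nat) (i count : Int) : Int :=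
  match fuel with
  | 0 => count
  | fuel + 1 =>
    if i ≤ ci ∧ ci + i < (cs.length : Int) ∧
        (PySem.List.pyGet? cs (ci - i) == PySem.List.pyGet? cs (ci + i)) = true then
      pvBLoop cs ci fuel (i + 1) (count + 1)
    else count

def howManyOddPalCen_alt (s : String) (center_index : Int) : Int :=
  if 0 ≤ center_index ∧ center_index < (s.toList.length : Int) then
    pvBLoop s.toList center_index (center_index + 1).toNat 0 0
  else 0

-- ===== PRECONDITION & SPEC =====
def Spec_howManyOddPalCen (s : String) (center_index : Int) (out : Int) : Prop := out = howManyOddPalCen_alt s center_index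
instance (s : String) (center_index : Int) (out : Int) : Decidable (Spec_howManyOddPalCen s center_index out) := by unfold Spec_howManyOddPalCen; infer_instance

-- ===== CLAIM (what is proved, stated in full; the proofs are below) =====
def Claim_equal_howManyOddPalCen : Prop := ∀ (s : String) (center_index : Int), Dom_howManyOddPalCen s center_index → Spec_howManyOddPalCen s center_index (howManyOddPalCen s center_index)

-- ===== LEMMAS AND PROOFS =====

-- a list of shape x :: m ++ [y] is a palindrome iff the ends match and the middle is one
lemma pal_cons_append (x y : Char) (m : List Char) :
    ((x :: (m ++ [y])).reverse = x :: (m ++ [y])) ↔ (x = y ∧ m.reverse = m) := by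
  simp only [List.reverse_cons, List.reverse_append, List.reverse_nil, List.nil_append,
    List.cons_append, List.cons.injEq, List.append_singleton_inj]
  constructor
  · rintro ⟨rfl, h, -⟩; exact ⟨rfl, h⟩
  · rintro ⟨rfl, h⟩; exact ⟨rfl, h, rfl⟩

-- loop equivalence, under the invariant that the inner slice already confirmed by A is a palindrome
lemma loop_eq (fuel : Nat) : ∀ (cs : List Char) (ci i c : Int),
    0 ≤ i →
    (0 < i → pvIsPal (PySem.List.slice cs (some (ci - i + 1)) (some (ci + i))) = true) →
    pvALoop cs ci fuel i c = pvBLoop cs ci fuel i c := by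
  induction fuel with
  | zero => intro cs ci i c _ _; rfl
  | succ fuel ih =>
    intro cs ci i c h0 hinv
    rw [pvALoop, pvBLoop]
    by_cases hA : i ≤ ci ∧ 0 ≤ ci + i ∧ ci + i < (cs.length : Int)
    · have hW : pvIsWithinRange cs (ci + i) = true := by
        rw [pvIsWithinRange, if_pos (by omega : ci + i ≥ 0)]
        simp only [decide_eq_true_eq]
        exact hA.2.2
      rw [if_pos ⟨hA.1, hW⟩]
      have hal : (ci - i).toNat < cs.length := by omega
      have hbl : (ci + i).toNat < cs.length := by omega
      have hga : PySem.List.pyGet? cs (ci - i) = some (cs[(ci - i).toNat]'hal) := by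
        have hcast : ci - i = (((ci - i).toNat : Nat) : Int) := by omega
        conv_lhs => rw [hcast]
        rw [PySem.List.pyGet?_natCast, List.getElem?_eq_getElem hal]
      have hgb : PySem.List.pyGet? cs (ci + i) = some (cs[(ci + i).toNat]'hbl) := by
        have hcast : ci + i = (((ci + i).toNat : Nat) : Int) := by omega
        conv_lhs => rw [hcast]
        rw [PySem.List.pyGet?_natCast, List.getElem?_eq_getElem hbl]
      have hkey : pvIsPal (PySem.List.slice cs (some (ci - i)) (some (ci + i + 1))) = true ↔
          cs[(ci - i).toNat]'hal = cs[(ci + i).toNat]'hbl := by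
        have hsl : PySem.List.slice cs (some (ci - i)) (some (ci + i + 1)) =
            (cs.drop (ci - i).toNat).take ((ci + i + 1).toNat - (ci - i).toNat) :=
          PySem.List.slice_toNat cs (by omega) (by omega)
        rcases Nat.eq_or_lt_of_le (show (ci - i).toNat ≤ (ci + i).toNat by omega) with hab | hab
        · -- i = 0: the slice is the single middle character
          have h1 : (ci + i + 1).toNat - (ci - i).toNat = 1 := by omega
          rw [hsl, h1, List.drop_eq_getElem_cons hal, List.take_succ_cons, List.take_zero]
          simp [pvIsPal, hab]
        · -- 0 < i: peel the two outer characters off the slice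
          have h1 : (ci + i + 1).toNat - (ci - i).toNat =
              ((ci + i).toNat - (ci - i).toNat - 1) + 1 + 1 := by omega
          rw [hsl, h1, List.drop_eq_getElem_cons hal, List.take_succ_cons, List.take_add_one,
            List.getElem?_drop]
          have h2 : (ci - i).toNat + 1 + ((ci + i).toNat - (ci - i).toNat - 1) = (ci + i).toNat := by
            omega
          rw [h2, List.getElem?_eq_getElem hbl]
          -- the middle is a palindrome, by the invariant
          have hi : 0 < i := by omega
          have hinv' := hinv hi
          have hsl2 : PySem.List.slice cs (some (ci - i + 1)) (some (ci + i)) =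
              (cs.drop (ci - i + 1).toNat).take ((ci + i).toNat - (ci - i + 1).toNat) :=
            PySem.List.slice_toNat cs (by omega) (by omega)
          have e1 : (ci - i + 1).toNat = (ci - i).toNat + 1 := by omega
          rw [hsl2, e1] at hinv'
          have hm : ((cs.drop ((ci - i).toNat + 1)).take
              ((ci + i).toNat - ((ci - i).toNat + 1))).reverse =
              (cs.drop ((ci - i).toNat + 1)).take ((ci + i).toNat - ((ci - i).toNat + 1)) := by
            simpa [pvIsPal] using hinv'
          have e2 : (ci + i).toNat - (ci - i).toNat - 1 =
              (ci + i).toNat - ((ci - i).toNat + 1) := by omega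
          rw [e2]
          simp only [pvIsPal, Option.toList_some, beq_iff_eq, pal_cons_append]
          constructor
          · rintro ⟨h, -⟩; exact h
          · intro h; exact ⟨h, hm⟩
      by_cases heq : cs[(ci - i).toNat]'hal = cs[(ci + i).toNat]'hbl
      · rw [if_pos (hkey.mpr heq),
          if_pos ⟨hA.1, hA.2.2, by rw [hga, hgb]; exact beq_iff_eq.mpr (by rw [heq])⟩]
        apply ih cs ci (i + 1) (c + 1) (by omega)
        intro _
        have e1 : ci - (i + 1) + 1 = ci - i := by ring
        have e2 : ci + (i + 1) = ci + i + 1 := by ring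
        rw [e1, e2]
        exact hkey.mpr heq
      · rw [if_neg (fun h => heq (hkey.mp h)),
          if_neg (by rintro ⟨-, -, hB⟩
                     rw [hga, hgb, beq_iff_eq] at hB
                     exact heq (Option.some.inj hB))]
    · -- both guards fail (0 ≤ ci + i is implied by 0 ≤ i ≤ ci)
      rw [if_neg, if_neg]
      · rintro ⟨h1, h2, -⟩
        exact hA ⟨h1, by omega, h2⟩
      · rintro ⟨h1, h2⟩
        rw [pvIsWithinRange] at h2
        split_ifs at h2 with hge
        simp only [decide_eq_true_eq] at h2
        exact hA ⟨h1, by omega, h2⟩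

-- ===== VERDICT (by name: the statement is the Claim_ definition above) =====
theorem howManyOddPalCen_spec : Claim_equal_howManyOddPalCen := by
  intro s ci _
  unfold Spec_howManyOddPalCen howManyOddPalCen howManyOddPalCen_alt
  by_cases h : 0 ≤ ci ∧ ci < ((s.toList.length : Int))
  · rw [if_pos h]
    exact loop_eq (ci + 1).toNat s.toList ci 0 0 le_rfl
      (fun hlt => absurd hlt (lt_irrefl 0))
  · rw [if_neg h]
    cases hf : (ci + 1).toNat with
    | zero => rfl
    | succ n =>
      rw [pvALoop, if_neg]
      rintro ⟨h1, h2⟩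
      rw [pvIsWithinRange] at h2
      split_ifs at h2 with hge
      simp only [decide_eq_true_eq] at h2
      exact h ⟨h1, by omega⟩
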